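-- pv_equiv track=rewrite | github.com/moiseenkocy/gaming-tools | Deponia_Doomsday/achievement_1001_jackalopes.py | generate_dna_with_fixed_genes
-- ===== SOURCE A (Python) =====
-- from typing import List
--
-- def generate_dna_combinations(dna_length: int, genes: List[int]) -> List[List[int]]:
--     """Generate all possible DNA combinations of genes with specified length."""
--     sorted_genes = sorted(genes)
--     if dna_length == 1:
--         return [[x] for x in sorted_genes]
--
--     shorter_dna_list = generate_dna_combinations(dna_length - 1, genes)
--
--     return [[head] + tail for head in sorted_genes for tail in shorter_dna_list]
--
-- def generate_gene_locations(
--     genes_num: int, available_locations: List[int]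
-- ) -> List[int]:
--     """Generate all possible locations for specified gene based on its copies number."""
--     sorted_locations = sorted(available_locations)
--
--     if genes_num == 1:
--         return [[loc] for loc in sorted_locations]
--
--     return [
--         [head] + tail
--         for head in sorted_locations
--         for tail in generate_gene_locations(
--             genes_num - 1, [x for x in set(sorted_locations) - set([head]) if x > head]
--         )
--     ]
--
-- def build_dna_with_fixed_gene(
--     fixed_gene: int, fixed_gene_locations: List[int], other_genes_seq: List[int]
-- ) -> List[int]:
--     """  """
--     dna_length = len(other_genes_seq) + len(fixed_gene_locations)
--     dna = [None] * dna_length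
--
--     all_gene_locations = list(range(dna_length))
--     other_genes_locations = sorted(set(all_gene_locations) - set(fixed_gene_locations))
--
--     for i in fixed_gene_locations:
--         dna[i] = fixed_gene
--
--     for other_gene, other_gene_location in zip(other_genes_seq, other_genes_locations):
--         dna[other_gene_location] = other_gene
--
--     return dna
--
-- def generate_dna_with_fixed_genes(
--     dna_length: int, fixed_gene: int, fixed_genes_num: int, other_genes: List[int],
-- ) -> List[List[int]]:
--     """Generate all possible combinations of DNA with 3 genes with one of them fixed in specific locations."""
--     return [
--         build_dna_with_fixed_gene(fixed_gene, fixed_gene_locations, other_genes_seq)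
--         for fixed_gene_locations in generate_gene_locations(
--             genes_num=fixed_genes_num, available_locations=list(range(dna_length))
--         )
--         for other_genes_seq in generate_dna_combinations(
--             dna_length - fixed_genes_num, other_genes
--         )
--     ]
-- ===== SOURCE B (Python) =====
-- from itertools import combinations, product
-- from typing import List
--
-- def generate_dna_with_fixed_genes(
--     dna_length: int, fixed_gene: int, fixed_genes_num: int, other_genes: List[int],
-- ) -> List[List[int]]:
--     """Generate all possible combinations of DNA with 3 genes with one of them fixed in specific locations."""
--     if fixed_genes_num > dna_length:
--         return []
--     pool = sorted(other_genes)
--     result = []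
--     for locations in combinations(range(dna_length), fixed_genes_num):
--         location_set = set(locations)
--         rest = [i for i in range(dna_length) if i not in location_set]
--         for seq in product(pool, repeat=dna_length - fixed_genes_num):
--             dna = [fixed_gene] * dna_length
--             for pos, gene in zip(rest, seq):
--                 dna[pos] = gene
--             result.append(dna)
--     return result
-- ===== Notes on version B (the rewrite author's own statement) =====
-- stated objective: idiomatic
-- what changed: Replaces the two recursive enumeration helpers and the set-arithmetic build step by direct iteration over itertools.combinations(range(dna_length), fixed_genes_num) and itertools.product(sorted(other_genes), repeat=dna_length-fixed_genes_num), filling each DNA in one pass.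
-- outside the precondition, e.g. on generate_dna_with_fixed_genes(2, 9, -1, [1, 2]): A returns [], B raises ValueError
import Mathlib
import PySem

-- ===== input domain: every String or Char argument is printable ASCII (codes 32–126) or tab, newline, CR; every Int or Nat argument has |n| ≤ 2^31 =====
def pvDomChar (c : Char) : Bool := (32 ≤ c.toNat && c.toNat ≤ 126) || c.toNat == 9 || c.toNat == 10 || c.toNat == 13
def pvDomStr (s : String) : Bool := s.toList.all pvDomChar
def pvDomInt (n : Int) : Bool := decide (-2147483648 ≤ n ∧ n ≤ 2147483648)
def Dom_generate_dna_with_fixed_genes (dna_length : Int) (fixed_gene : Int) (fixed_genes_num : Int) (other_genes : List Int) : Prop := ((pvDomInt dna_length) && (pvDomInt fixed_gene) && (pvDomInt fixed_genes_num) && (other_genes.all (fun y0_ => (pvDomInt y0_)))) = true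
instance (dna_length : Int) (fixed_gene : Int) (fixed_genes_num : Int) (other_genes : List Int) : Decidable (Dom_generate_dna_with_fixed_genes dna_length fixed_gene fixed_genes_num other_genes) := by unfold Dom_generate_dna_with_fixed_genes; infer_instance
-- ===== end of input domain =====

-- B replaces A's two recursive enumeration helpers and set-arithmetic build by direct iteration over
-- itertools.combinations / itertools.product (idiomatic; same asymptotic cost).

-- ===== PORT A =====

-- generate_dna_combinations.  Python recurses without bound for dna_length < 1 (the `== 1` base case is
-- never reached); the `if _ : dna_length < 1` guard only makes that diverging region total ([] is never
-- observed: such calls are outside Pre_ or dropped by an empty outer list in the entry).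
def pyGenDnaCombA (dna_length : Int) (genes : List Int) : List (List Int) :=
  if _h : dna_length < 1 then []
  else
    let sorted_genes := PySem.List.sorted genes (fun x => x)
    if dna_length = 1 then sorted_genes.map (fun x => [x])
    else
      let shorter_dna_list := pyGenDnaCombA (dna_length - 1) genes
      sorted_genes.flatMap (fun head => shorter_dna_list.map (fun tail => [head] ++ tail))
  termination_by dna_length.toNat
  decreasing_by omega

-- generate_gene_locations.  The Python list comprehension iterates over the set
-- `set(sorted_locations) - set([head])` in hash order, but the recursive call immediately sorts its
-- argument, so that order is never observable; we pass the set (a PySem.Set list) directly.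
-- `.attach` only carries the membership fact needed for termination.
def pyGenGeneLocsA (genes_num : Int) (available_locations : List Int) : List (List Int) :=
  let sorted_locations := PySem.List.sorted available_locations (fun x => x)
  if genes_num = 1 then sorted_locations.map (fun loc => [loc])
  else
    sorted_locations.attach.flatMap (fun h =>
      (pyGenGeneLocsA (genes_num - 1)
        (((PySem.Set.ofList sorted_locations).diff (PySem.Set.ofList [h.1])).filter
          (fun x => decide (h.1 < x)))).map (fun tail => [h.1] ++ tail))
  termination_by available_locations.length
  decreasing_by
    have h1 : (((PySem.Set.ofList (PySem.List.sorted available_locations (fun x => x))).diff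
          (PySem.Set.ofList [h.1])).filter (fun x => decide (h.1 < x))).length
        < (PySem.Set.ofList (PySem.List.sorted available_locations (fun x => x))).length := by
      have hm : h.1 ∈ PySem.Set.ofList (PySem.List.sorted available_locations (fun x => x)) :=
        (PySem.Set.mem_ofList _ _).mpr h.2
      unfold PySem.Set.diff
      rw [List.filter_filter]
      exact List.length_filter_lt_length_iff_exists.mpr ⟨h.1, hm, by simp⟩
    have h2 : (PySem.Set.ofList (PySem.List.sorted available_locations (fun x => x))).length
        ≤ (PySem.List.sorted available_locations (fun x => x)).length :=
      PySem.Set.length_ofList_le _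
    have h3 : (PySem.List.sorted available_locations (fun x => x)).length
        = available_locations.length := PySem.List.length_sorted _ _ _
    omega

-- build_dna_with_fixed_gene.  Python's `dna` holds Optional cells; every call reached from the entry
-- fills all of them, so the final `.getD 0` never fires there.  `pySetD` is exact for the in-range,
-- nonnegative indices every entry call supplies.
def pyBuildA (fixed_gene : Int) (fixed_gene_locations : List Int) (other_genes_seq : List Int) : List Int :=
  let dna_length := other_genes_seq.length + fixed_gene_locations.length
  let dna : List (Option Int) := List.replicate dna_length none
  let all_gene_locations := PySem.List.pyRange 0 (dna_length : Int)
  let other_genes_locations := PySem.List.sorted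
    ((PySem.Set.ofList all_gene_locations).diff (PySem.Set.ofList fixed_gene_locations)) (fun x => x)
  let dna1 := fixed_gene_locations.foldl (fun d i => PySem.List.pySetD d i (some fixed_gene)) dna
  let dna2 := (other_genes_seq.zip other_genes_locations).foldl
    (fun d p => PySem.List.pySetD d p.2 (some p.1)) dna1
  dna2.map (fun o => o.getD 0)

def generate_dna_with_fixed_genes (dna_length : Int) (fixed_gene : Int) (fixed_genes_num : Int) (other_genes : List Int) : List (List Int) :=
  (pyGenGeneLocsA fixed_genes_num (PySem.List.pyRange 0 dna_length)).flatMap (fun fixed_gene_locations =>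
    (pyGenDnaCombA (dna_length - fixed_genes_num) other_genes).map (fun other_genes_seq =>
      pyBuildA fixed_gene fixed_gene_locations other_genes_seq))

-- ===== PORT B =====

-- itertools.combinations(pool, r): lexicographic by position, hand-ported (not in PySem).
def pyCombinations : List Int → Nat → List (List Int)
  | _, 0 => [[]]
  | [], _ + 1 => []
  | x :: xs, r + 1 => (pyCombinations xs r).map (fun c => x :: c) ++ pyCombinations xs (r + 1)

-- itertools.product(pool, repeat=r): leftmost position varies slowest.
def pyProductRep (pool : List Int) : Nat → List (List Int)
  | 0 => [[]]
  | r + 1 => pool.flatMap (fun h => (pyProductRep pool r).map (fun t => h :: t))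

-- Source B returns [] outright when fixed_genes_num > dna_length (combinations would be empty), and
-- raises ValueError for fixed_genes_num < 0 (combinations' r must be nonnegative) — the latter is
-- outside Pre_; that `if` guard and the `.toNat`s only make the excluded region total.
-- `repeat=dna_length-fixed_genes_num` is negative only when combinations yields nothing.
def generate_dna_with_fixed_genes_alt (dna_length : Int) (fixed_gene : Int) (fixed_genes_num : Int) (other_genes : List Int) : List (List Int) :=
  if dna_length < fixed_genes_num then []
  else if fixed_genes_num < 0 then []
  else
    let pool := PySem.List.sorted other_genes (fun x => x)
    (pyCombinations (PySem.List.pyRange 0 dna_length) fixed_genes_num.toNat).flatMap (fun locations =>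
      let rest := (PySem.List.pyRange 0 dna_length).filter
        (fun i => !(PySem.Set.ofList locations).contains i)
      (pyProductRep pool (dna_length - fixed_genes_num).toNat).map (fun seq =>
        (rest.zip seq).foldl (fun d p => PySem.List.pySetD d p.1 p.2)
          (List.replicate dna_length.toNat fixed_gene)))

-- ===== PRECONDITION & SPEC =====

-- Pre_ excludes (a) fixed_genes_num = dna_length ≥ 1, where A raises RecursionError
-- (generate_dna_combinations(0, …) recurses forever), and (b) fixed_genes_num ≤ 0, an unspecified
-- corner outside the function's purpose ("one of them fixed"): there A returns [] only because its
-- `== 1` base case never fires, while the itertools-based B raises ValueError for negative counts and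
-- returns the one empty placement's products for zero — both defensible, neither specified.
def Pre_generate_dna_with_fixed_genes (dna_length : Int) (fixed_gene : Int) (fixed_genes_num : Int) (other_genes : List Int) : Prop :=
  1 ≤ fixed_genes_num ∧ fixed_genes_num ≠ dna_length
instance (dna_length : Int) (fixed_gene : Int) (fixed_genes_num : Int) (other_genes : List Int) : Decidable (Pre_generate_dna_with_fixed_genes dna_length fixed_gene fixed_genes_num other_genes) := by unfold Pre_generate_dna_with_fixed_genes; infer_instance

def pvWitness_generate_dna_with_fixed_genes : Int × Int × Int × List Int := (3, 9, 1, [1, 2])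

def Spec_generate_dna_with_fixed_genes (dna_length : Int) (fixed_gene : Int) (fixed_genes_num : Int) (other_genes : List Int) (out : List (List Int)) : Prop := out = generate_dna_with_fixed_genes_alt dna_length fixed_gene fixed_genes_num other_genes
instance (dna_length : Int) (fixed_gene : Int) (fixed_genes_num : Int) (other_genes : List Int) (out : List (List Int)) : Decidable (Spec_generate_dna_with_fixed_genes dna_length fixed_gene fixed_genes_num other_genes out) := by unfold Spec_generate_dna_with_fixed_genes; infer_instance

-- ===== CLAIM (what is proved, stated in full; the proofs are below) =====
def Claim_equal_generate_dna_with_fixed_genes : Prop := ∀ (dna_length : Int) (fixed_gene : Int) (fixed_genes_num : Int) (other_genes : List Int), Dom_generate_dna_with_fixed_genes dna_length fixed_gene fixed_genes_num other_genes → Pre_generate_dna_with_fixed_genes dna_length fixed_gene fixed_genes_num other_genes → Spec_generate_dna_with_fixed_genes dna_length fixed_gene fixed_genes_num other_genes (generate_dna_with_fixed_genes dna_length fixed_gene fixed_genes_num other_genes)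

-- ===== LEMMAS AND PROOFS =====

theorem pv_witness_ok : Dom_generate_dna_with_fixed_genes (pvWitness_generate_dna_with_fixed_genes.1) (pvWitness_generate_dna_with_fixed_genes.2.1) (pvWitness_generate_dna_with_fixed_genes.2.2.1) (pvWitness_generate_dna_with_fixed_genes.2.2.2) ∧ Pre_generate_dna_with_fixed_genes (pvWitness_generate_dna_with_fixed_genes.1) (pvWitness_generate_dna_with_fixed_genes.2.1) (pvWitness_generate_dna_with_fixed_genes.2.2.1) (pvWitness_generate_dna_with_fixed_genes.2.2.2) := by decide

theorem pyRange_zero_eq (n : Int) :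
    PySem.List.pyRange 0 n = (List.range n.toNat).map (fun (k : Nat) => (k : Int)) := by
  by_cases h : 0 ≤ n
  · calc PySem.List.pyRange 0 n = PySem.List.pyRange 0 ((n.toNat : Nat) : Int) := by
          rw [Int.toNat_of_nonneg h]
      _ = (List.range n.toNat).map (fun (k : Nat) => (k : Int)) := PySem.List.pyRange_zero_natCast _
  · have h1 : n.toNat = 0 := by omega
    rw [h1]
    simp only [List.range_zero, List.map_nil]
    simp [PySem.List.pyRange]
    omega

theorem pyRange_pairwise (n : Int) :
    (PySem.List.pyRange 0 n).Pairwise (· < ·) := by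
  rw [pyRange_zero_eq]
  refine List.pairwise_map.mpr (List.pairwise_lt_range.imp ?_)
  intro a b hab
  exact_mod_cast hab

theorem pyRange_len (n : Int) : (PySem.List.pyRange 0 n).length = n.toNat := by
  rw [pyRange_zero_eq]; simp

-- == combinations facts ==
theorem combos_mem_length {L : List Int} {r : Nat} {c : List Int}
    (h : c ∈ pyCombinations L r) : c.length = r := by
  induction L generalizing r c with
  | nil =>
    cases r with
    | zero => simp only [pyCombinations, List.mem_singleton] at h; simp [h]
    | succ r => simp [pyCombinations] at h
  | cons x xs ih =>
    cases r with
    | zero => simp only [pyCombinations, List.mem_singleton] at h; simp [h]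
    | succ r =>
      simp only [pyCombinations, List.mem_append, List.mem_map] at h
      rcases h with ⟨c', hc', rfl⟩ | h
      · simp [ih hc']
      · exact ih h

theorem combos_mem_sublist {L : List Int} {r : Nat} {c : List Int}
    (h : c ∈ pyCombinations L r) : c.Sublist L := by
  induction L generalizing r c with
  | nil =>
    cases r with
    | zero => simp only [pyCombinations, List.mem_singleton] at h; simp [h]
    | succ r => simp [pyCombinations] at h
  | cons x xs ih =>
    cases r with
    | zero =>
      simp only [pyCombinations, List.mem_singleton] at h
      simp [h]
    | succ r =>
      simp only [pyCombinations, List.mem_append, List.mem_map] at h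
      rcases h with ⟨c', hc', rfl⟩ | h
      · exact (ih hc').cons₂ x
      · exact (ih h).cons x

theorem combos_nil {L : List Int} {r : Nat} (h : L.length < r) : pyCombinations L r = [] := by
  induction L generalizing r with
  | nil =>
    cases r with
    | zero => simp at h
    | succ r => rfl
  | cons x xs ih =>
    cases r with
    | zero => simp at h
    | succ r =>
      simp only [pyCombinations]
      rw [ih (by simpa using h), ih (by simp at h; omega)]
      rfl

theorem combos_one (L : List Int) : pyCombinations L 1 = L.map (fun x => [x]) := by
  induction L with
  | nil => rfl
  | cons x xs ih => simp [pyCombinations, ih]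

theorem combos_flatMap (L : List Int) (hL : L.Pairwise (· < ·)) (r : Nat) :
    pyCombinations L (r + 1)
      = L.flatMap (fun h => (pyCombinations (L.filter (fun x => decide (h < x))) r).map
          (fun c => h :: c)) := by
  induction L with
  | nil => simp [pyCombinations]
  | cons x xs ih =>
    obtain ⟨hx, hxs⟩ := List.pairwise_cons.mp hL
    have hfx : (x :: xs).filter (fun z => decide (x < z)) = xs := by
      rw [List.filter_cons_of_neg (by simp)]
      exact List.filter_eq_self.mpr (fun y hy => by simpa using hx y hy)
    have hcong : ∀ h' ∈ xs,
        ((pyCombinations ((x :: xs).filter (fun z => decide (h' < z))) r).map (fun c => h' :: c))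
          = ((pyCombinations (xs.filter (fun z => decide (h' < z))) r).map (fun c => h' :: c)) := by
      intro h' hh'
      rw [List.filter_cons_of_neg (by simp [not_lt.mpr (le_of_lt (hx h' hh'))])]
    rw [List.flatMap_cons, hfx, List.flatMap_congr hcong, ← ih hxs]
    rfl

-- == the recursive location enumerator IS combinations ==
theorem ggl_eq_combos (L : List Int) (hL : L.Pairwise (· < ·)) (k : Int) (hk : 1 ≤ k) :
    pyGenGeneLocsA k L = pyCombinations L k.toNat := by
  induction hN : L.length using Nat.strong_induction_on generalizing L k with
  | _ N ih =>
  subst hN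
  have hnd : L.Nodup := hL.imp ne_of_lt
  have hsorted : PySem.List.sorted L (fun x => x) = L :=
    PySem.List.sorted_eq_self_of_pairwise _ _ (hL.imp le_of_lt)
  rw [pyGenGeneLocsA]
  by_cases h1 : k = 1
  · subst h1
    rw [if_pos rfl, hsorted, Int.toNat_one, combos_one]
  · rw [if_neg h1]
    have hattach : ∀ (M : List Int) (f : Int → List (List Int)),
        M.attach.flatMap (fun h => f h.1) = M.flatMap f := by
      intro M f; simp
    rw [hattach (PySem.List.sorted L (fun x => x))
        (fun h => (pyGenGeneLocsA (k - 1)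
          (((PySem.Set.ofList (PySem.List.sorted L (fun x => x))).diff
            (PySem.Set.ofList [h])).filter (fun x => decide (h < x)))).map
          (fun tail => [h] ++ tail))]
    simp only [hsorted]
    have harg : ∀ h ∈ L,
        (((PySem.Set.ofList L).diff (PySem.Set.ofList [h])).filter (fun x => decide (h < x)))
          = L.filter (fun x => decide (h < x)) := by
      intro h hh
      rw [PySem.Set.ofList_eq_self_of_nodup L hnd,
        PySem.Set.ofList_eq_self_of_nodup [h] (by simp)]
      unfold PySem.Set.diff
      rw [List.filter_filter]
      apply List.filter_congr
      intro x _
      by_cases hlt : h < x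
      · simp [hlt, (ne_of_gt hlt)]
      · simp [hlt]
    have hstep : ∀ h ∈ L,
        ((pyGenGeneLocsA (k - 1)
            (((PySem.Set.ofList L).diff (PySem.Set.ofList [h])).filter (fun x => decide (h < x)))).map
          (fun tail => [h] ++ tail))
          = ((pyCombinations (L.filter (fun x => decide (h < x))) (k - 1).toNat).map
              (fun tail => h :: tail)) := by
      intro h hh
      rw [harg h hh]
      have hlt : (L.filter (fun x => decide (h < x))).length < L.length :=
        List.length_filter_lt_length_iff_exists.mpr ⟨h, hh, by simp⟩
      rw [ih _ hlt _ (hL.sublist List.filter_sublist) (k - 1) (by omega) rfl]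
      simp
    calc L.flatMap (fun h =>
          (pyGenGeneLocsA (k - 1)
            (((PySem.Set.ofList L).diff (PySem.Set.ofList [h])).filter
              (fun x => decide (h < x)))).map (fun tail => [h] ++ tail))
        = L.flatMap (fun h =>
          (pyCombinations (L.filter (fun x => decide (h < x))) (k - 1).toNat).map
            (fun tail => h :: tail)) := List.flatMap_congr hstep
      _ = pyCombinations L k.toNat := by
          rw [← combos_flatMap L hL (k - 1).toNat]
          congr 1
          omega

-- == the recursive gene enumerator IS product ==
theorem prod_mem_length {pool : List Int} {r : Nat} {s : List Int}
    (h : s ∈ pyProductRep pool r) : s.length = r := by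
  induction r generalizing s with
  | zero => simp only [pyProductRep, List.mem_singleton] at h; simp [h]
  | succ r ih =>
    simp only [pyProductRep, List.mem_flatMap, List.mem_map] at h
    obtain ⟨x, _, t, ht, rfl⟩ := h
    simp [ih ht]

theorem gdc_eq_prod (m : Int) (hm : 1 ≤ m) (genes : List Int) :
    pyGenDnaCombA m genes = pyProductRep (PySem.List.sorted genes (fun x => x)) m.toNat := by
  induction m, hm using Int.le_induction with
  | base =>
    rw [pyGenDnaCombA]
    norm_num
    simp [pyProductRep, List.map_eq_flatMap]
  | succ m hm ih =>
    rw [pyGenDnaCombA]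
    rw [dif_neg (by omega), if_neg (by omega)]
    have h1 : m + 1 - 1 = m := by ring
    rw [h1, ih]
    have h2 : (m + 1).toNat = m.toNat + 1 := by omega
    rw [h2]
    simp only [pyProductRep]
    apply List.flatMap_congr
    intro x _
    simp

-- == write-fold reading lemmas ==
theorem pySetD_of_in_range {α : Type} (xs : List α) (i : Int) (v : α)
    (h0 : 0 ≤ i) (hl : i.toNat < xs.length) :
    PySem.List.pySetD xs i v = xs.set i.toNat v := by
  unfold PySem.List.pySetD
  rw [show i = ((i.toNat : Nat) : Int) from (Int.toNat_of_nonneg h0).symm,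
    PySem.List.pySet?_natCast _ _ _ (by simpa using hl)]
  simp only [Option.getD_some, Int.toNat_natCast]

theorem foldl_write_length {α β : Type} (pos : β → Int) (val : β → α)
    (ps : List β) (xs : List α) :
    (ps.foldl (fun d p => PySem.List.pySetD d (pos p) (val p)) xs).length = xs.length := by
  induction ps generalizing xs with
  | nil => rfl
  | cons p ps ih =>
    rw [List.foldl_cons, ih, PySem.List.length_pySetD]

theorem foldl_write_same {α : Type} (v : α) (is : List Int) (xs : List α) (j : Nat)
    (hj : j < xs.length) (hin : ∀ i ∈ is, 0 ≤ i ∧ i.toNat < xs.length) :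
    (is.foldl (fun d i => PySem.List.pySetD d i v) xs)[j]?
      = some (if (j : Int) ∈ is then v else xs[j]) := by
  induction is generalizing xs with
  | nil => simp [List.getElem?_eq_getElem hj]
  | cons i is ih =>
    obtain ⟨h0, hl⟩ := hin i (List.mem_cons_self ..)
    have hset : PySem.List.pySetD xs i v = xs.set i.toNat v := pySetD_of_in_range xs i v h0 hl
    have hjl : j < (xs.set i.toNat v).length := by simpa using hj
    have hin' : ∀ i' ∈ is, 0 ≤ i' ∧ i'.toNat < (xs.set i.toNat v).length := by
      intro i' hi'
      simpa using hin i' (List.mem_cons_of_mem _ hi')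
    rw [List.foldl_cons, hset, ih (xs.set i.toNat v) hjl hin']
    by_cases hmem : (j : Int) ∈ is
    · simp [hmem]
    · by_cases heq : i = (j : Int)
      · have ht : i.toNat = j := by omega
        simp [heq.symm, ht]
      · have heq' : ¬ ((j : Int) = i) := fun h => heq h.symm
        have hne : i.toNat ≠ j := by omega
        simp [hmem, heq', hne]

theorem foldl_write_getElem {α β : Type} (pos : β → Int) (val : β → α)
    (ps : List β) (xs : List α) (j : Nat) (hj : j < xs.length)
    (hin : ∀ p ∈ ps, 0 ≤ pos p ∧ (pos p).toNat < xs.length)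
    (hnd : (ps.map pos).Nodup) :
    (ps.foldl (fun d p => PySem.List.pySetD d (pos p) (val p)) xs)[j]?
      = some ((((ps.find? (fun p => pos p == (j : Int)))).map val).getD (xs[j])) := by
  induction ps generalizing xs with
  | nil => simp [List.getElem?_eq_getElem hj]
  | cons p ps ih =>
    obtain ⟨h0, hl⟩ := hin p (List.mem_cons_self ..)
    have hset : PySem.List.pySetD xs (pos p) (val p) = xs.set (pos p).toNat (val p) :=
      pySetD_of_in_range xs (pos p) (val p) h0 hl
    have hjl : j < (xs.set (pos p).toNat (val p)).length := by simpa using hj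
    have hin' : ∀ q ∈ ps, 0 ≤ pos q ∧ (pos q).toNat < (xs.set (pos p).toNat (val p)).length := by
      intro q hq
      simpa using hin q (List.mem_cons_of_mem _ hq)
    obtain ⟨hnotin, hnd'⟩ := List.nodup_cons.mp hnd
    rw [List.foldl_cons, hset, ih (xs.set (pos p).toNat (val p)) hjl hin' hnd']
    by_cases hc : pos p = (j : Int)
    · have hfind : ps.find? (fun q => pos q == (j : Int)) = none := by
        apply List.find?_eq_none.mpr
        intro q hq
        simp only [beq_iff_eq]
        intro hqe
        exact hnotin (hc ▸ hqe ▸ List.mem_map_of_mem hq)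
      have hpn : (pos p).toNat = j := by omega
      rw [hfind, List.find?_cons_of_pos (by simp [hc])]
      simp [hpn]
    · rw [List.find?_cons_of_neg (by simp [hc])]
      cases hf : ps.find? (fun q => pos q == (j : Int)) with
      | some q => simp
      | none =>
        have hne : (pos p).toNat ≠ j := by omega
        simp [hne]

theorem filter_mem_sublist {s L : List Int} (h : s.Sublist L) (hnd : L.Nodup) :
    L.filter (fun x => decide (x ∈ s)) = s := by
  induction h with
  | slnil => rfl
  | @cons s' L' a h ih =>
    obtain ⟨ha, hnd'⟩ := List.nodup_cons.mp hnd
    have hna : a ∉ s' := fun hmem => ha (h.subset hmem)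
    rw [List.filter_cons_of_neg (by simpa using hna)]
    exact ih hnd'
  | @cons₂ s' L' a h ih =>
    obtain ⟨ha, hnd'⟩ := List.nodup_cons.mp hnd
    rw [List.filter_cons_of_pos (by simp)]
    congr 1
    rw [show L'.filter (fun x => decide (x ∈ a :: s')) = L'.filter (fun x => decide (x ∈ s')) from ?_]
    · exact ih hnd'
    · apply List.filter_congr
      intro x hx
      have hxa : x ≠ a := fun he => ha (he ▸ hx)
      simp [hxa]

-- == the two build steps agree ==
theorem build_eq (n g : Int) (hn : 0 ≤ n) (locs : List Int)
    (hsub : locs.Sublist (PySem.List.pyRange 0 n)) (seq : List Int)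
    (hlen : seq.length + locs.length = n.toNat) :
    pyBuildA g locs seq
      = (((PySem.List.pyRange 0 n).filter (fun i => !(PySem.Set.ofList locs).contains i)).zip seq).foldl
          (fun d p => PySem.List.pySetD d p.1 p.2) (List.replicate n.toNat g) := by
  have hndR : (PySem.List.pyRange 0 n).Nodup := (pyRange_pairwise n).imp ne_of_lt
  have hlocsnd : locs.Nodup := hndR.sublist hsub
  have hlocsmem : ∀ i ∈ locs, 0 ≤ i ∧ i < n := by
    intro i hi
    have := hsub.subset hi
    rwa [PySem.List.mem_pyRange_one] at this
  have hOfl : PySem.Set.ofList locs = locs := PySem.Set.ofList_eq_self_of_nodup _ hlocsnd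
  have hOfR : PySem.Set.ofList (PySem.List.pyRange 0 n) = PySem.List.pyRange 0 n :=
    PySem.Set.ofList_eq_self_of_nodup _ hndR
  set R := PySem.List.pyRange 0 n with hR
  set rest := R.filter (fun i => !(PySem.Set.ofList locs).contains i) with hrestdef
  have hcontains : ∀ x : Int, ((PySem.Set.ofList locs).contains x) = decide (x ∈ locs) := by
    intro x
    simp [PySem.Set.contains]
  have hrest_pair : rest.Pairwise (· < ·) := (pyRange_pairwise n).sublist List.filter_sublist
  have hrestnd : rest.Nodup := hrest_pair.imp ne_of_lt
  have hRlen : R.length = n.toNat := pyRange_len n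
  have hrestlen : rest.length + locs.length = n.toNat := by
    have hneg : R.filter (fun i => !(!(PySem.Set.ofList locs).contains i)) = locs := by
      have hfun : (fun i : Int => !(!(PySem.Set.ofList locs).contains i))
          = fun i : Int => decide (i ∈ locs) := by
        funext i
        simp [PySem.Set.contains]
      rw [hfun]
      exact filter_mem_sublist hsub hndR
    have hpart := List.length_eq_length_filter_add
      (l := R) (fun i => !(PySem.Set.ofList locs).contains i)
    rw [hneg, ← hrestdef] at hpart
    omega
  have hseqrest : seq.length = rest.length := by omega
  have hrestmem : ∀ i ∈ rest, 0 ≤ i ∧ i.toNat < n.toNat := by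
    intro i hi
    have h1 : i ∈ R := List.filter_sublist.subset hi
    rw [hR, PySem.List.mem_pyRange_one] at h1
    omega
  -- unfold A's build and identify its pieces
  show ((seq.zip (PySem.List.sorted ((PySem.Set.ofList (PySem.List.pyRange 0
        ((seq.length + locs.length : Nat) : Int))).diff (PySem.Set.ofList locs)) (fun x => x))).foldl
      (fun d p => PySem.List.pySetD d p.2 (some p.1))
      (locs.foldl (fun d i => PySem.List.pySetD d i (some g))
        (List.replicate (seq.length + locs.length) (none : Option Int)))).map (fun o => o.getD 0)
    = (rest.zip seq).foldl (fun d p => PySem.List.pySetD d p.1 p.2) (List.replicate n.toNat g)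
  have hcast : ((seq.length + locs.length : Nat) : Int) = n := by
    rw [hlen, Int.toNat_of_nonneg hn]
  rw [hcast, hlen]
  have hsortrest : PySem.List.sorted ((PySem.Set.ofList R).diff (PySem.Set.ofList locs))
      (fun x => x) = rest := by
    rw [hOfR]
    exact PySem.List.sorted_eq_self_of_pairwise _ _ (hrest_pair.imp le_of_lt)
  rw [hsortrest]
  -- lengths of the accumulated arrays
  have hd1len : (locs.foldl (fun d i => PySem.List.pySetD d i (some g))
      (List.replicate n.toNat (none : Option Int))).length = n.toNat := by
    rw [foldl_write_length (fun i => i) (fun _ => some g), List.length_replicate]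
  set dna1 := locs.foldl (fun d i => PySem.List.pySetD d i (some g))
      (List.replicate n.toNat (none : Option Int)) with hdna1
  set dna2 := (seq.zip rest).foldl (fun d p => PySem.List.pySetD d p.2 (some p.1)) dna1 with hdna2
  have hd2len : dna2.length = n.toNat := by
    rw [hdna2, foldl_write_length (fun p : Int × Int => p.2) (fun p : Int × Int => some p.1), hd1len]
  have hrhslen : ((rest.zip seq).foldl (fun d p => PySem.List.pySetD d p.1 p.2)
      (List.replicate n.toNat g)).length = n.toNat := by
    rw [foldl_write_length (fun p : Int × Int => p.1) (fun p : Int × Int => p.2),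
      List.length_replicate]
  apply List.ext_getElem?
  intro j
  by_cases hj : j < n.toNat
  · -- in-range index: read both write-folds
    have hjd1 : j < dna1.length := by omega
    have hd1 : dna1[j]? = some (if (j : Int) ∈ locs then some g else none) := by
      rw [hdna1]
      have := foldl_write_same (some g) locs (List.replicate n.toNat (none : Option Int)) j
        (by simpa using hj)
        (by intro i hi
            have := hlocsmem i hi
            simp only [List.length_replicate]
            omega)
      simpa using this
    have hsnd : (seq.zip rest).map Prod.snd = rest :=
      List.map_snd_zip (le_of_eq hseqrest.symm)
    have hd2 : dna2[j]? = some ((((seq.zip rest).find? (fun p => p.2 == (j : Int))).map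
        (fun p => some p.1)).getD (dna1[j]'hjd1)) := by
      rw [hdna2]
      exact foldl_write_getElem (fun p => p.2) (fun p => some p.1) (seq.zip rest) dna1 j hjd1
        (by intro p hp
            have := hrestmem p.2 (hsnd ▸ List.mem_map_of_mem hp)
            rw [hd1len]
            omega)
        (by rw [hsnd]; exact hrestnd)
    have hfst : (rest.zip seq).map Prod.fst = rest :=
      List.map_fst_zip (le_of_eq hseqrest.symm)
    have hrhs : ((rest.zip seq).foldl (fun d p => PySem.List.pySetD d p.1 p.2)
        (List.replicate n.toNat g))[j]?
        = some ((((rest.zip seq).find? (fun p => p.1 == (j : Int))).map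
            (fun p => p.2)).getD g) := by
      have := foldl_write_getElem (fun p : Int × Int => p.1) (fun p : Int × Int => p.2)
        (rest.zip seq) (List.replicate n.toNat g) j (by simpa using hj)
        (by intro p hp
            have := hrestmem p.1 (hfst ▸ List.mem_map_of_mem hp)
            simp only [List.length_replicate]
            omega)
        (by rw [hfst]; exact hrestnd)
      simpa using this
    have hswap : rest.zip seq = (seq.zip rest).map Prod.swap := (List.zip_swap seq rest).symm
    have hfswap : ((rest.zip seq).find? (fun p => p.1 == (j : Int)))
        = ((seq.zip rest).find? (fun p => p.2 == (j : Int))).map Prod.swap := by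
      rw [hswap, List.find?_map]
      rfl
    rw [List.getElem?_map, hd2, hrhs, hfswap]
    have hd1v : dna1[j]'hjd1 = if (j : Int) ∈ locs then some g else none := by
      have := hd1
      rw [List.getElem?_eq_getElem hjd1] at this
      exact Option.some.inj this
    rw [hd1v]
    cases hfind : (seq.zip rest).find? (fun p => p.2 == (j : Int)) with
    | some q => simp
    | none =>
      have hjlocs : (j : Int) ∈ locs := by
        by_contra hjl
        have hjR : (j : Int) ∈ R := by
          rw [hR, PySem.List.mem_pyRange_one]
          omega
        have hjrest : (j : Int) ∈ rest := by
          rw [hrestdef, List.mem_filter]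
          exact ⟨hjR, by simp [PySem.Set.contains, hjl]⟩
        rw [← hsnd] at hjrest
        obtain ⟨p, hp, hpj⟩ := List.mem_map.mp hjrest
        have := List.find?_eq_none.mp hfind p hp
        simp [hpj] at this
      simp [hjlocs]
  · -- out of range: both none
    have h1 : (dna2.map (fun o => o.getD 0)).length ≤ j := by
      simpa [hd2len] using Nat.le_of_not_lt hj
    have h2 : ((rest.zip seq).foldl (fun d p => PySem.List.pySetD d p.1 p.2)
        (List.replicate n.toNat g)).length ≤ j := by
      rw [hrhslen]; omega
    rw [List.getElem?_eq_none h1, List.getElem?_eq_none h2]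

-- ===== VERDICT (by name: the statement is the Claim_ definition above) =====
theorem generate_dna_with_fixed_genes_spec : Claim_equal_generate_dna_with_fixed_genes := by
  intro n g k other _ hpre
  obtain ⟨hk, hkn⟩ := hpre
  unfold Spec_generate_dna_with_fixed_genes
  unfold generate_dna_with_fixed_genes generate_dna_with_fixed_genes_alt
  rw [ggl_eq_combos _ (pyRange_pairwise n) k hk]
  by_cases hbig : n < k
  · rw [if_pos hbig, combos_nil (by rw [pyRange_len]; omega), List.flatMap_nil]
  · rw [if_neg hbig, if_neg (by omega : ¬ k < 0)]
    apply List.flatMap_congr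
    intro locs hlocs
    have hsub := combos_mem_sublist hlocs
    have hclen := combos_mem_length hlocs
    have hle : k.toNat ≤ n.toNat := by
      have := hsub.length_le
      rw [pyRange_len] at this
      omega
    have hn0 : 0 ≤ n := by omega
    have hklt : k < n := by omega
    rw [gdc_eq_prod (n - k) (by omega)]
    apply List.map_congr_left
    intro seq hseq
    have hslen := prod_mem_length hseq
    exact build_eq n g hn0 locs hsub seq (by omega)
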